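-- pv_equiv track=rewrite | github.com/spfantasy/LeetCode | OA/20180123.py | func
-- ===== SOURCE A (Python) =====
-- def func(nums):
--     withLast = [None] * len(nums)
--     withoutLast = [None] * len(nums)
--     for i in range(len(nums)):
--         if i - 1 >= 0:
--             withLast[i] = max(
--                 withLast[i - 1], withoutLast[i - 1]) + nums[i]
--             withoutLast[i] = withLast[i - 1]
--         else:
--             withLast[i] = nums[i]
--             withoutLast[i] = 0
--     return max(withLast[-1], withoutLast[-1])
-- ===== SOURCE B (Python) =====
-- def func(nums):
--     # Complement view: answer = sum(nums) minus the minimum-weight set of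
--     # skipped elements, where no two adjacent elements may both be skipped.
--     total = sum(nums)
--     skip_any = skip_keep_first = 0
--     for x in reversed(nums):
--         skip_any, skip_keep_first = min(skip_any, x + skip_keep_first), skip_any
--     return total - skip_any
-- ===== Notes on version B (the rewrite author's own statement) =====
-- stated objective: alternative
-- what changed: Recasts the problem as its complement: B returns sum(nums) minus the minimum-weight set of skipped elements (no two adjacent skipped), computed by a right-to-left min recurrence in two scalars, instead of A's left-to-right maximization over two DP arrays; avoiding the array allocation and per-step indexing is a constant-factor speedup.
import Mathlib
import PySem

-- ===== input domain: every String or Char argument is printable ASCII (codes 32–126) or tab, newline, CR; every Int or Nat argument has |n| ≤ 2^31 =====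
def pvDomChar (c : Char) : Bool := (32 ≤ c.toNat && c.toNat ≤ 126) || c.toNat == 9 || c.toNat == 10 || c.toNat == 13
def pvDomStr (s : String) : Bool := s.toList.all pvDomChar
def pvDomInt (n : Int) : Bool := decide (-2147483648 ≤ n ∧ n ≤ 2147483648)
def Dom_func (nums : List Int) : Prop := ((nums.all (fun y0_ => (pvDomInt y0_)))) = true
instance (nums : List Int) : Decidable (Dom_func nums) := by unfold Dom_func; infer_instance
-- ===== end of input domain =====

-- B solves the complementary problem (total sum minus a right-to-left minimum over skipped weights) instead of A's forward two-array max DP; equivalence is about the return value only.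

-- ===== PORT A =====
-- loop body of A: state = (withLast, withoutLast) filled up to i entries
def funcStep (nums : List Int) (st : List Int × List Int) (i : Int) : List Int × List Int :=
  if i - 1 ≥ 0 then
    (st.1 ++ [max (PySem.List.pyGetD st.1 (i - 1) 0) (PySem.List.pyGetD st.2 (i - 1) 0) + PySem.List.pyGetD nums i 0],
     st.2 ++ [PySem.List.pyGetD st.1 (i - 1) 0])
  else
    (st.1 ++ [PySem.List.pyGetD nums i 0], st.2 ++ [0])

def func (nums : List Int) : Int :=
  let st := (PySem.List.pyRange 0 (nums.length : Int) 1).foldl (funcStep nums) ([], [])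
  max (PySem.List.pyGetD st.1 (-1) 0) (PySem.List.pyGetD st.2 (-1) 0)

-- ===== PORT B =====
-- loop body of B: state = (skip_any, skip_keep_first), the two running minima
def func_altStep (s : Int × Int) (x : Int) : Int × Int := (min s.1 (x + s.2), s.1)

def func_alt (nums : List Int) : Int :=
  let total := nums.sum
  let p := nums.reverse.foldl func_altStep (0, 0)
  total - p.1

-- ===== PRECONDITION & SPEC =====
-- Pre_ excludes only the empty list, on which A raises IndexError reading the last DP entry.
def Pre_func (nums : List Int) : Prop := nums ≠ []
instance (nums : List Int) : Decidable (Pre_func nums) := by unfold Pre_func; infer_instance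
def pvWitness_func : List Int := [3, -2, 5]

def Spec_func (nums : List Int) (out : Int) : Prop := out = func_alt nums
instance (nums : List Int) (out : Int) : Decidable (Spec_func nums out) := by unfold Spec_func; infer_instance

-- ===== CLAIM (what is proved, stated in full; the proofs are below) =====
def Claim_equal_func : Prop := ∀ (nums : List Int), Dom_func nums → Pre_func nums → Spec_func nums (func nums)

-- ===== LEMMAS AND PROOFS =====

-- proof-side reference: Mx xs = (best sum over xs, best sum with first element taken),
-- where a valid configuration never skips two adjacent elements
def Mx : List Int → Int × Int
  | [] => (0, 0)
  | x :: xs => (max ((Mx xs).2) (x + (Mx xs).1), x + (Mx xs).1)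

-- proof-side copy of the forward rolling-scalar recurrence A's arrays implement
def fwdStep (s : Int × Int) (x : Int) : Int × Int := (s.2, max s.2 s.1 + x)

lemma mx_snd_le (xs : List Int) : (Mx xs).2 ≤ (Mx xs).1 := by
  cases xs with
  | nil => simp [Mx]
  | cons x xs => simp [Mx]

-- B's backward min fold is the complement of Mx
lemma bwd_eq (xs : List Int) :
    xs.foldr (fun x s => func_altStep s x) (0, 0)
      = (xs.sum - (Mx xs).1, xs.sum - (Mx xs).2) := by
  induction xs with
  | nil => simp [Mx]
  | cons x xs ih =>
    rw [List.foldr_cons, ih]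
    simp only [func_altStep, Mx, List.sum_cons, Prod.mk.injEq]
    constructor
    · omega
    · omega

-- the forward max fold, from any state, computes Mx of the rest
lemma fwd_eq (xs : List Int) : ∀ (s : Int × Int),
    max (xs.foldl fwdStep s).2 (xs.foldl fwdStep s).1
      = max (s.2 + (Mx xs).1) (s.1 + (Mx xs).2) := by
  induction xs with
  | nil => intro s; simp [Mx]
  | cons x xs ih =>
    intro s
    rw [List.foldl_cons, ih]
    simp only [fwdStep, Mx]
    omega

-- reading index (len-1) is reading the last element
lemma getD_len_sub_one (xs : List Int) (hne : xs ≠ []) :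
    PySem.List.pyGetD xs ((xs.length : Int) - 1) 0 = PySem.List.pyGetD xs (-1) 0 := by
  have hlen : 0 < xs.length := List.length_pos_iff.mpr hne
  rw [PySem.List.pyGetD_eq_getElem xs 0 (by omega) (by omega),
      PySem.List.pyGetD_neg_one _ _ hne, List.getLast_eq_getElem]
  congr 1
  omega

-- loop invariant: after k iterations A's two array tails are the forward rolling scalars on the k-prefix
lemma loop_inv (nums : List Int) (k : ℕ) (hk : k ≤ nums.length) :
    (((PySem.List.pyRange 0 (k : Int) 1).foldl (funcStep nums) ([], [])).1.length = k) ∧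
    (((PySem.List.pyRange 0 (k : Int) 1).foldl (funcStep nums) ([], [])).2.length = k) ∧
    (PySem.List.pyGetD ((PySem.List.pyRange 0 (k : Int) 1).foldl (funcStep nums) ([], [])).1 (-1) 0
      = ((nums.take k).foldl fwdStep (0, 0)).2) ∧
    (PySem.List.pyGetD ((PySem.List.pyRange 0 (k : Int) 1).foldl (funcStep nums) ([], [])).2 (-1) 0
      = ((nums.take k).foldl fwdStep (0, 0)).1) := by
  induction k with
  | zero =>
    rw [show PySem.List.pyRange 0 ((0:ℕ):Int) 1 = [] from PySem.List.pyRange_one_eq_nil (by norm_num)]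
    refine ⟨rfl, rfl, ?_, ?_⟩ <;> simp [PySem.List.pyGetD, PySem.List.pyGet?, PySem.List.pyIdx?]
  | succ k ih =>
    obtain ⟨h1, h2, h3, h4⟩ := ih (by omega)
    have hkl : k < nums.length := by omega
    have hsplit : PySem.List.pyRange 0 ((k + 1 : ℕ) : Int) 1
        = PySem.List.pyRange 0 (k : Int) 1 ++ [(k : Int)] := by
      push_cast
      exact PySem.List.pyRange_one_succ_right (by positivity)
    set st := (PySem.List.pyRange 0 (k : Int) 1).foldl (funcStep nums) ([], []) with hst
    have htake : nums.take (k + 1) = nums.take k ++ [nums[k]] := by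
      rw [List.take_add_one]
      simp [hkl]
    have hnum : PySem.List.pyGetD nums (k : Int) 0 = nums[k] :=
      PySem.List.pyGetD_ofNat _ _ _ hkl
    rw [hsplit, List.foldl_append, htake, List.foldl_append]
    simp only [List.foldl_cons, List.foldl_nil]
    rw [← hst]
    rcases Nat.eq_zero_or_pos k with hk0 | hkpos
    · subst hk0
      have hstnil : st = ([], []) := by
        rw [Prod.ext_iff]
        exact ⟨List.eq_nil_of_length_eq_zero h1, List.eq_nil_of_length_eq_zero h2⟩
      rw [hstnil]
      simp only [funcStep, fwdStep, Nat.cast_zero, List.take_zero, List.foldl_nil,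
        List.nil_append]
      rw [if_neg (by omega : ¬ ((0:Int) - 1 ≥ 0))]
      refine ⟨rfl, rfl, ?_, ?_⟩ <;>
        simp [PySem.List.pyGetD, PySem.List.pyGet?, PySem.List.pyIdx?, hkl]
    · have hne1 : st.1 ≠ [] := by
        intro h; rw [h] at h1; simp at h1; omega
      have hne2 : st.2 ≠ [] := by
        intro h; rw [h] at h2; simp at h2; omega
      have hidx1 : PySem.List.pyGetD st.1 ((k : Int) - 1) 0 = PySem.List.pyGetD st.1 (-1) 0 := by
        conv_lhs => rw [← h1]
        exact getD_len_sub_one _ hne1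
      have hidx2 : PySem.List.pyGetD st.2 ((k : Int) - 1) 0 = PySem.List.pyGetD st.2 (-1) 0 := by
        conv_lhs => rw [← h2]
        exact getD_len_sub_one _ hne2
      simp only [funcStep, fwdStep, if_pos (by omega : ((k:Int) - 1 ≥ 0))]
      refine ⟨by simp [h1], by simp [h2], ?_, ?_⟩
      · rw [PySem.List.pyGetD_neg_one_append_singleton, hidx1, hidx2, h3, h4, hnum]
      · rw [PySem.List.pyGetD_neg_one_append_singleton, hidx1, h3]

-- ===== VERDICT (by name: the statement is the Claim_ definition above) =====
theorem func_spec : Claim_equal_func := by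
  intro nums _ _
  unfold Spec_func func func_alt
  obtain ⟨_, _, h3, h4⟩ := loop_inv nums nums.length (le_refl _)
  simp only [List.take_length] at h3 h4
  simp only
  rw [h3, h4, fwd_eq]
  rw [List.foldl_reverse]
  have hb := bwd_eq nums
  rw [hb]
  have := mx_snd_le nums
  omega
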